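-- pv_equiv track=rewrite | github.com/alouiseq/fitmatrix | scripts/populate_library_target_muscles.py | map_muscle_to_group
-- ===== SOURCE A (Python) =====
-- def map_muscle_to_group(muscle_name):
--     """Map specific muscle names to muscle groups"""
--     muscle_name_lower = muscle_name.lower()
--
--     # Chest muscles
--     if any(chest in muscle_name_lower for chest in ["chest", "pecs", "pectoral"]):
--         return "chest"
--
--     # Back muscles
--     if any(back in muscle_name_lower for back in ["lats", "traps", "rhomboids", "erector spinae", "rear delts"]):
--         return "back"
--
--     # Shoulder muscles
--     if any(shoulder in muscle_name_lower for shoulder in ["delts", "deltoids", "front delts", "side delts"]):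
--         return "deltoids"
--
--     # Arm muscles
--     if any(arm in muscle_name_lower for arm in ["biceps", "triceps"]):
--         if "biceps" in muscle_name_lower:
--             return "biceps"
--         elif "triceps" in muscle_name_lower:
--             return "triceps"
--
--     # Leg muscles
--     if any(leg in muscle_name_lower for leg in ["quadriceps", "quads", "hamstrings", "glutes", "calves", "adductors", "abductors"]):
--         return "legs"
--
--     # Core muscles
--     if any(core in muscle_name_lower for core in ["abs", "obliques", "core", "rectus abdominis"]):
--         return "core"
--
--     # Forearm muscles
--     if any(forearm in muscle_name_lower for forearm in ["forearms", "grip"]):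
--         return "forearms"
--
--     # Default fallback
--     return "chest"  # Default to chest if unclear
-- ===== SOURCE B (Python) =====
-- # Alternative algorithm: one left-to-right positional scan of the name, matching the
-- # keyword table at every index and keeping the minimum-priority hit; the priority is
-- # mapped to its group at the end (index 8 = no hit = default "chest").
-- _KEYWORDS = [
--     ("chest", 0), ("pecs", 0), ("pectoral", 0),
--     ("lats", 1), ("traps", 1), ("rhomboids", 1), ("erector spinae", 1), ("rear delts", 1),
--     ("delts", 2), ("deltoids", 2), ("front delts", 2), ("side delts", 2),
--     ("biceps", 3),
--     ("triceps", 4),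
--     ("quadriceps", 5), ("quads", 5), ("hamstrings", 5), ("glutes", 5), ("calves", 5), ("adductors", 5), ("abductors", 5),
--     ("abs", 6), ("obliques", 6), ("core", 6), ("rectus abdominis", 6),
--     ("forearms", 7), ("grip", 7),
-- ]
-- _GROUPS = ["chest", "back", "deltoids", "biceps", "triceps", "legs", "core", "forearms", "chest"]
--
-- def map_muscle_to_group(muscle_name):
--     """Map specific muscle names to muscle groups"""
--     name = muscle_name.lower()
--     best = 8  # index of the default group
--     for i in range(len(name)):
--         for kw, pri in _KEYWORDS:
--             if name.startswith(kw, i):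
--                 best = min(best, pri)
--     return _GROUPS[best]
-- ===== Notes on version B (the rewrite author's own statement) =====
-- stated objective: alternative
-- what changed: Replaces A's ordered chain of per-group substring-membership guards (with a nested biceps/triceps special case) by a single left-to-right positional scan that matches a flat keyword table at every index with a minimum-priority accumulator, mapping the winning priority to its group name at the end.
import Mathlib
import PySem

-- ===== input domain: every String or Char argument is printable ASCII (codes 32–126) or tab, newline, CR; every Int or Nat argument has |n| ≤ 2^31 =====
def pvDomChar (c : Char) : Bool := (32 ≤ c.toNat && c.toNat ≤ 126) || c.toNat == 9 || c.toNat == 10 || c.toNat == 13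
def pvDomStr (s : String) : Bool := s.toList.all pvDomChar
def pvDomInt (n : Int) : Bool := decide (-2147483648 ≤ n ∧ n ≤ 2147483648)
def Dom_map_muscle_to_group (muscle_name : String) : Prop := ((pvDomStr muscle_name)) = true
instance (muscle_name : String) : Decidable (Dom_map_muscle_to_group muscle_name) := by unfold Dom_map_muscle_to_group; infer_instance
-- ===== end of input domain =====

-- B replaces A's ordered chain of substring-membership guards by a single positional
-- scan with a minimum-priority accumulator over a keyword table (objective: alternative).

-- ===== PORT A =====
-- helper: the leg/core/forearm chain Python falls through to after the arm block
def pvArmRest (m : String) : String :=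
  if (["quadriceps", "quads", "hamstrings", "glutes", "calves", "adductors", "abductors"].any
      (fun leg => PySem.Str.isIn leg m)) then "legs"
  else if (["abs", "obliques", "core", "rectus abdominis"].any (fun core => PySem.Str.isIn core m)) then "core"
  else if (["forearms", "grip"].any (fun fa => PySem.Str.isIn fa m)) then "forearms"
  else "chest"

def map_muscle_to_group (muscle_name : String) : String :=
  let m := PySem.Str.lower muscle_name
  if (["chest", "pecs", "pectoral"].any (fun c => PySem.Str.isIn c m)) then "chest"
  else if (["lats", "traps", "rhomboids", "erector spinae", "rear delts"].any
      (fun b => PySem.Str.isIn b m)) then "back"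
  else if (["delts", "deltoids", "front delts", "side delts"].any (fun s => PySem.Str.isIn s m)) then "deltoids"
  else if (["biceps", "triceps"].any (fun a => PySem.Str.isIn a m)) then
    (if PySem.Str.isIn "biceps" m then "biceps"
     else if PySem.Str.isIn "triceps" m then "triceps"
     else pvArmRest m)   -- Python's inner if/elif without else falls through to the later checks
  else pvArmRest m

-- ===== PORT B =====
def pvKeywords : List (String × Nat) :=
  [("chest", 0), ("pecs", 0), ("pectoral", 0),
   ("lats", 1), ("traps", 1), ("rhomboids", 1), ("erector spinae", 1), ("rear delts", 1),
   ("delts", 2), ("deltoids", 2), ("front delts", 2), ("side delts", 2),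
   ("biceps", 3),
   ("triceps", 4),
   ("quadriceps", 5), ("quads", 5), ("hamstrings", 5), ("glutes", 5), ("calves", 5), ("adductors", 5), ("abductors", 5),
   ("abs", 6), ("obliques", 6), ("core", 6), ("rectus abdominis", 6),
   ("forearms", 7), ("grip", 7)]

def pvGroups : List String :=
  ["chest", "back", "deltoids", "biceps", "triceps", "legs", "core", "forearms", "chest"]

-- inner loop body: for kw, pri in _KEYWORDS: if name.startswith(kw, i): best = min(best, pri)
-- (name.startswith(kw, i) with 0 ≤ i is exactly: kw.toList is a prefix of the chars dropped by i)
def pvInner (cs : List Char) (i : Nat) (b : Nat) : Nat :=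
  pvKeywords.foldl (fun b2 kp =>
    if PySem.Chars.startswith (cs.drop i) kp.1.toList then min b2 kp.2 else b2) b

-- outer loop: for i in range(len(name)), starting with best = 8
def pvScan (cs : List Char) : Nat :=
  (List.range cs.length).foldl (fun b i => pvInner cs i b) 8

def map_muscle_to_group_alt (muscle_name : String) : String :=
  let name := PySem.Str.lower muscle_name
  -- _GROUPS[best]: best ≤ 8 < 9 = len(_GROUPS), so the plain-list getD is exact
  pvGroups.getD (pvScan name.toList) "chest"

-- ===== PRECONDITION & SPEC =====
def Spec_map_muscle_to_group (muscle_name : String) (out : String) : Prop := out = map_muscle_to_group_alt muscle_name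
instance (muscle_name : String) (out : String) : Decidable (Spec_map_muscle_to_group muscle_name out) := by unfold Spec_map_muscle_to_group; infer_instance

-- ===== CLAIM (what is proved, stated in full; the proofs are below) =====
def Claim_equal_map_muscle_to_group : Prop := ∀ (muscle_name : String), Dom_map_muscle_to_group muscle_name → Spec_map_muscle_to_group muscle_name (map_muscle_to_group muscle_name)

-- ===== LEMMAS AND PROOFS =====

-- "some keyword of priority k occurs in m"
def pvMG (m : String) (k : Nat) : Prop :=
  ∃ kw, (kw, k) ∈ pvKeywords ∧ PySem.Str.isIn kw m = true

-- generic facts about a fold whose step never increases the accumulator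
lemma pvFoldl_le {α : Type} (f : Nat → α → Nat) (h : ∀ b a, f b a ≤ b) :
    ∀ (L : List α) (b : Nat), L.foldl f b ≤ b := by
  intro L
  induction L with
  | nil => intro b; simp
  | cons a L ih => intro b; exact le_trans (ih (f b a)) (h b a)

lemma pvFoldl_hit {α : Type} (f : Nat → α → Nat) (h : ∀ b a, f b a ≤ b) (p : Nat)
    (a : α) (ha : ∀ b, f b a ≤ p) :
    ∀ (L : List α) (b : Nat), a ∈ L → L.foldl f b ≤ p := by
  intro L
  induction L with
  | nil => intro b hb; simp at hb
  | cons x L ih =>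
      intro b hb
      rcases List.mem_cons.mp hb with rfl | hmem
      · exact le_trans (pvFoldl_le f h L (f b a)) (ha b)
      · exact ih (f b x) hmem

lemma pvInner_step_le (cs : List Char) (i : Nat) :
    ∀ (b : Nat) (kp : String × Nat),
      (if PySem.Chars.startswith (cs.drop i) kp.1.toList then min b kp.2 else b) ≤ b := by
  intro b kp; split
  · exact min_le_left _ _
  · exact le_refl b

lemma pvInner_le (cs : List Char) (i : Nat) (b : Nat) : pvInner cs i b ≤ b :=
  pvFoldl_le _ (pvInner_step_le cs i) pvKeywords b

lemma pvInner_le_of_hit (cs : List Char) (i : Nat) (kw : String) (p : Nat)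
    (hk : (kw, p) ∈ pvKeywords)
    (hs : PySem.Chars.startswith (cs.drop i) kw.toList = true) (b : Nat) :
    pvInner cs i b ≤ p := by
  refine pvFoldl_hit _ (pvInner_step_le cs i) p (kw, p) ?_ pvKeywords b hk
  intro b2
  simp only [hs, if_true]
  exact min_le_right _ _

lemma pvScan_le_of_match (m : String) (kw : String) (p : Nat)
    (hk : (kw, p) ∈ pvKeywords) (hne : kw.toList ≠ [])
    (hin : PySem.Str.isIn kw m = true) : pvScan m.toList ≤ p := by
  have hinf : kw.toList <:+: m.toList := (PySem.Str.isIn_iff_infix _ _).mp hin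
  have hcin : PySem.Chars.isIn kw.toList m.toList = true :=
    (PySem.Chars.isIn_iff_infix _ _).mpr hinf
  obtain ⟨j, hj⟩ := (PySem.Chars.exists_prefix_drop_iff_isIn kw.toList m.toList).mpr hcin
  have hjlt : j < m.toList.length := by
    by_contra hge
    rw [List.drop_eq_nil_of_le (Nat.le_of_not_lt hge)] at hj
    exact hne (List.prefix_nil.mp hj)
  have hs : PySem.Chars.startswith (m.toList.drop j) kw.toList = true :=
    (PySem.Chars.startswith_iff _ _).mpr hj
  exact pvFoldl_hit _ (fun b i => pvInner_le m.toList i b) p j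
    (fun b => pvInner_le_of_hit m.toList j kw p hk hs b)
    (List.range m.toList.length) 8 (List.mem_range.mpr hjlt)

lemma pvFoldl_inner_mem (cs : List Char) (i : Nat) :
    ∀ (L : List (String × Nat)) (b : Nat),
      L.foldl (fun b2 kp =>
        if PySem.Chars.startswith (cs.drop i) kp.1.toList then min b2 kp.2 else b2) b = b ∨
      ∃ kp ∈ L, PySem.Chars.startswith (cs.drop i) kp.1.toList = true ∧
        L.foldl (fun b2 kp =>
          if PySem.Chars.startswith (cs.drop i) kp.1.toList then min b2 kp.2 else b2) b = kp.2 := by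
  intro L
  induction L with
  | nil => intro b; exact Or.inl rfl
  | cons x L ih =>
      intro b
      simp only [List.foldl_cons]
      rcases ih (if PySem.Chars.startswith (cs.drop i) x.1.toList then min b x.2 else b) with h | ⟨kp, hmem, hc, hval⟩
      · rw [h]
        by_cases hs : PySem.Chars.startswith (cs.drop i) x.1.toList = true
        · simp only [hs, if_true]
          rcases min_choice b x.2 with hmin | hmin
          · exact Or.inl hmin
          · exact Or.inr ⟨x, List.mem_cons_self, hs, hmin⟩
        · rw [if_neg hs]
          exact Or.inl rfl
      · exact Or.inr ⟨kp, List.mem_cons_of_mem _ hmem, hc, hval⟩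

lemma pvScan_mem (m : String) : pvScan m.toList = 8 ∨ pvMG m (pvScan m.toList) := by
  have main : ∀ (L : List Nat) (b : Nat),
      L.foldl (fun b i => pvInner m.toList i b) b = b ∨
      ∃ i ∈ L, ∃ kp ∈ pvKeywords, PySem.Chars.startswith (m.toList.drop i) kp.1.toList = true ∧
        L.foldl (fun b i => pvInner m.toList i b) b = kp.2 := by
    intro L
    induction L with
    | nil => intro b; exact Or.inl rfl
    | cons x L ih =>
        intro b
        simp only [List.foldl_cons]
        rcases ih (pvInner m.toList x b) with h | ⟨i, hi, kp, hkp, hc, hval⟩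
        · rw [h]
          rcases pvFoldl_inner_mem m.toList x pvKeywords b with h2 | ⟨kp, hkp, hc, hval⟩
          · exact Or.inl h2
          · exact Or.inr ⟨x, List.mem_cons_self, kp, hkp, hc, hval⟩
        · exact Or.inr ⟨i, List.mem_cons_of_mem _ hi, kp, hkp, hc, hval⟩
  rcases main (List.range m.toList.length) 8 with h | ⟨i, _, kp, hkp, hc, hval⟩
  · exact Or.inl h
  · right
    unfold pvScan
    rw [hval]
    refine ⟨kp.1, by simpa using hkp, ?_⟩
    have hpre : kp.1.toList <+: m.toList.drop i := (PySem.Chars.startswith_iff _ _).mp hc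
    have : PySem.Chars.isIn kp.1.toList m.toList = true :=
      (PySem.Chars.exists_prefix_drop_iff_isIn kp.1.toList m.toList).mp ⟨i, hpre⟩
    exact (PySem.Str.isIn_iff_infix _ _).mpr ((PySem.Chars.isIn_iff_infix _ _).mp this)

lemma pvKeywords_nonempty : ∀ kp ∈ pvKeywords, kp.1.toList ≠ [] := by decide

lemma pvKeywords_pri_lt : ∀ kp ∈ pvKeywords, kp.2 < 8 := by decide

lemma pvMG_lt (m : String) (k : Nat) (h : pvMG m k) : k < 8 := by
  obtain ⟨kw, hmem, _⟩ := h
  exact pvKeywords_pri_lt (kw, k) hmem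

lemma pvScan_eq (m : String) (k : Nat) (hk : pvMG m k)
    (hlt : ∀ j, j < k → ¬ pvMG m j) : pvScan m.toList = k := by
  obtain ⟨kw, hmem, hin⟩ := hk
  have hle : pvScan m.toList ≤ k :=
    pvScan_le_of_match m kw k hmem (pvKeywords_nonempty (kw, k) hmem) hin
  rcases pvScan_mem m with h8 | hmg
  · have := pvMG_lt m k ⟨kw, hmem, hin⟩
    omega
  · by_contra hne
    exact hlt _ (lt_of_le_of_ne hle hne) hmg

lemma pvScan_eq_default (m : String) (hall : ∀ j, ¬ pvMG m j) : pvScan m.toList = 8 := by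
  rcases pvScan_mem m with h8 | hmg
  · exact h8
  · exact absurd hmg (hall _)

-- the group-level boolean of A in terms of pvMG
lemma pvMG0 (m : String) : pvMG m 0 ↔ (["chest", "pecs", "pectoral"].any (fun c => PySem.Str.isIn c m)) = true := by
  simp [pvMG, pvKeywords]

lemma pvMG1 (m : String) : pvMG m 1 ↔ (["lats", "traps", "rhomboids", "erector spinae", "rear delts"].any (fun b => PySem.Str.isIn b m)) = true := by
  simp [pvMG, pvKeywords]

lemma pvMG2 (m : String) : pvMG m 2 ↔ (["delts", "deltoids", "front delts", "side delts"].any (fun s => PySem.Str.isIn s m)) = true := by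
  simp [pvMG, pvKeywords]

lemma pvMG3 (m : String) : pvMG m 3 ↔ PySem.Str.isIn "biceps" m = true := by
  simp [pvMG, pvKeywords]

lemma pvMG4 (m : String) : pvMG m 4 ↔ PySem.Str.isIn "triceps" m = true := by
  simp [pvMG, pvKeywords]

lemma pvMG5 (m : String) : pvMG m 5 ↔ (["quadriceps", "quads", "hamstrings", "glutes", "calves", "adductors", "abductors"].any (fun leg => PySem.Str.isIn leg m)) = true := by
  simp [pvMG, pvKeywords]

lemma pvMG6 (m : String) : pvMG m 6 ↔ (["abs", "obliques", "core", "rectus abdominis"].any (fun core => PySem.Str.isIn core m)) = true := by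
  simp [pvMG, pvKeywords]

lemma pvMG7 (m : String) : pvMG m 7 ↔ (["forearms", "grip"].any (fun fa => PySem.Str.isIn fa m)) = true := by
  simp [pvMG, pvKeywords]

lemma pvChain_eq_scan (m : String) :
    (if (["chest", "pecs", "pectoral"].any (fun c => PySem.Str.isIn c m)) then "chest"
     else if (["lats", "traps", "rhomboids", "erector spinae", "rear delts"].any
         (fun b => PySem.Str.isIn b m)) then "back"
     else if (["delts", "deltoids", "front delts", "side delts"].any (fun s => PySem.Str.isIn s m)) then "deltoids"
     else if (["biceps", "triceps"].any (fun a => PySem.Str.isIn a m)) then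
       (if PySem.Str.isIn "biceps" m then "biceps"
        else if PySem.Str.isIn "triceps" m then "triceps"
        else pvArmRest m)
     else pvArmRest m) = pvGroups.getD (pvScan m.toList) "chest" := by
  by_cases h0 : pvMG m 0
  · rw [pvScan_eq m 0 h0 (by omega), if_pos ((pvMG0 m).mp h0)]; rfl
  have c0 : ¬ ((["chest", "pecs", "pectoral"].any (fun c => PySem.Str.isIn c m)) = true) :=
    fun h => h0 ((pvMG0 m).mpr h)
  rw [if_neg c0]
  by_cases h1 : pvMG m 1
  · rw [pvScan_eq m 1 h1 (by intro j hj; interval_cases j; exact h0), if_pos ((pvMG1 m).mp h1)]; rfl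
  have c1 : ¬ ((["lats", "traps", "rhomboids", "erector spinae", "rear delts"].any
      (fun b => PySem.Str.isIn b m)) = true) := fun h => h1 ((pvMG1 m).mpr h)
  rw [if_neg c1]
  by_cases h2 : pvMG m 2
  · rw [pvScan_eq m 2 h2 (by intro j hj; interval_cases j <;> assumption), if_pos ((pvMG2 m).mp h2)]; rfl
  have c2 : ¬ ((["delts", "deltoids", "front delts", "side delts"].any
      (fun s => PySem.Str.isIn s m)) = true) := fun h => h2 ((pvMG2 m).mpr h)
  rw [if_neg c2]
  by_cases h3 : pvMG m 3
  · have hb : PySem.Str.isIn "biceps" m = true := (pvMG3 m).mp h3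
    rw [pvScan_eq m 3 h3 (by intro j hj; interval_cases j <;> assumption),
      if_pos (show (["biceps", "triceps"].any (fun a => PySem.Str.isIn a m)) = true by
        simp only [List.any_cons, List.any_nil, hb, Bool.true_or]),
      if_pos hb]
    rfl
  have c3 : PySem.Str.isIn "biceps" m = false := by
    rw [← Bool.not_eq_true]; exact fun h => h3 ((pvMG3 m).mpr h)
  by_cases h4 : pvMG m 4
  · have ht : PySem.Str.isIn "triceps" m = true := (pvMG4 m).mp h4
    rw [pvScan_eq m 4 h4 (by intro j hj; interval_cases j <;> assumption),
      if_pos (show (["biceps", "triceps"].any (fun a => PySem.Str.isIn a m)) = true by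
        simp only [List.any_cons, List.any_nil, ht, Bool.true_or, Bool.or_true]),
      if_neg (by simp only [c3]; decide), if_pos ht]
    rfl
  have c4 : PySem.Str.isIn "triceps" m = false := by
    rw [← Bool.not_eq_true]; exact fun h => h4 ((pvMG4 m).mpr h)
  rw [if_neg (show ¬ ((["biceps", "triceps"].any (fun a => PySem.Str.isIn a m)) = true) by
    simp only [List.any_cons, List.any_nil, c3, c4, Bool.or_self]
    decide)]
  unfold pvArmRest
  by_cases h5 : pvMG m 5
  · rw [pvScan_eq m 5 h5 (by intro j hj; interval_cases j <;> assumption), if_pos ((pvMG5 m).mp h5)]; rfl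
  have c5 : ¬ ((["quadriceps", "quads", "hamstrings", "glutes", "calves", "adductors", "abductors"].any
      (fun leg => PySem.Str.isIn leg m)) = true) := fun h => h5 ((pvMG5 m).mpr h)
  rw [if_neg c5]
  by_cases h6 : pvMG m 6
  · rw [pvScan_eq m 6 h6 (by intro j hj; interval_cases j <;> assumption), if_pos ((pvMG6 m).mp h6)]; rfl
  have c6 : ¬ ((["abs", "obliques", "core", "rectus abdominis"].any
      (fun core => PySem.Str.isIn core m)) = true) := fun h => h6 ((pvMG6 m).mpr h)
  rw [if_neg c6]
  by_cases h7 : pvMG m 7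
  · rw [pvScan_eq m 7 h7 (by intro j hj; interval_cases j <;> assumption), if_pos ((pvMG7 m).mp h7)]; rfl
  have c7 : ¬ ((["forearms", "grip"].any (fun fa => PySem.Str.isIn fa m)) = true) :=
    fun h => h7 ((pvMG7 m).mpr h)
  rw [if_neg c7]
  have hall : ∀ j, ¬ pvMG m j := by
    intro j hj
    have := pvMG_lt m j hj
    interval_cases j <;> tauto
  rw [pvScan_eq_default m hall]
  rfl

-- ===== VERDICT (by name: the statement is the Claim_ definition above) =====
theorem map_muscle_to_group_spec : Claim_equal_map_muscle_to_group := by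
  intro s _
  unfold Spec_map_muscle_to_group map_muscle_to_group map_muscle_to_group_alt
  exact pvChain_eq_scan (PySem.Str.lower s)
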